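-- pv_equiv track=rewrite | github.com/SuleymanEmirGergin/MasalFabrikasi | backend/app/services/story_interactive_games_service.py | _extract_characters
-- ===== SOURCE A (Python) =====
-- from typing import Dict, List, Optional
--
-- def _extract_characters(text: str) -> List[str]:
--     """Karakterleri çıkarır."""
--     # Basit yaklaşım
--     words = text.split()
--     characters = []
--     for i, word in enumerate(words):
--         if word and word[0].isupper() and len(word) > 2:
--             if i == 0 or words[i-1][-1] in '.!?':
--                 characters.append(word.strip('.,!?;:'))
--     return list(set(characters))[:10]
-- ===== SOURCE B (Python) =====
-- from typing import Dict, List, Optional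
--
-- def _extract_characters(text: str) -> List[str]:
--     """Karakterleri cikarir."""
--     # Stage 1: segment the text into sentences, cutting before any whitespace
--     # that immediately follows a '.', '!' or '?'.
--     segments = []
--     cur = []
--     after_ender = False
--     for ch in text:
--         if after_ender and ch.isspace():
--             segments.append(''.join(cur))
--             cur = []
--         cur.append(ch)
--         after_ender = ch in '.!?'
--     segments.append(''.join(cur))
--     # Stage 2: the first whitespace-token of each segment is a sentence-start candidate.
--     candidates = [toks[0] for toks in (seg.split() for seg in segments) if toks]
--     # Stage 3: keep capitalized candidates longer than 2 chars, strip punctuation, ordered dedup.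
--     characters = [w.strip('.,!?;:') for w in candidates if w[0].isupper() and len(w) > 2]
--     return list(dict.fromkeys(characters))[:10]
-- ===== Notes on version B (the rewrite author's own statement) =====
-- stated objective: alternative
-- what changed: Replaces A's word-level enumerate scan with back-references to words[i-1] and its unordered list(set(...)) by a staged pipeline: character-level segmentation of the text into sentences (cut before whitespace following .!?), then the first whitespace-token of each segment as candidate, then filter/strip and an ordered dict.fromkeys dedup.
-- outside the precondition, e.g. on _extract_characters('Ali geldi. Veli gitti.'): A returns ['Veli', 'Ali'], B returns ['Ali', 'Veli']
import Mathlib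
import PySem

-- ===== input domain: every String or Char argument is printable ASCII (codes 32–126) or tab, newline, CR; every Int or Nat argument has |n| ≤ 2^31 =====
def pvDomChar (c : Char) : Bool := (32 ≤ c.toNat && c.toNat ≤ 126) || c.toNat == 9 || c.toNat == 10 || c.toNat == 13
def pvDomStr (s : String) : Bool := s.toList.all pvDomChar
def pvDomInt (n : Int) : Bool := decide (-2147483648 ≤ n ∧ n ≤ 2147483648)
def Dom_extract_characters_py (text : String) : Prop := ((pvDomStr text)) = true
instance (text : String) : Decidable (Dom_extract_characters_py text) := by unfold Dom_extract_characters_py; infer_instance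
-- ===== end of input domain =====

-- B replaces A's word-indexed scan (back-references to words[i-1]) + list(set(...)) by a staged
-- pipeline: character-level sentence segmentation, head token of each segment, filter/strip,
-- ordered dedup (objective: alternative decomposition).

-- ===== PORT A =====
-- A-side helpers: the two inline tests of A's loop body.
-- 'word and word[0].isupper() and len(word) > 2' (word[0] on a nonempty word never raises)
def pvACond1 (w : String) : Bool :=
  decide (PySem.Str.len w ≠ 0) &&
    (match PySem.Str.pyGet? w 0 with | some c => PySem.Chars.isupper c | none => false) &&
    decide (PySem.Str.len w > 2)

-- 'for i, word in enumerate(words): …' as structural recursion over the remaining words, carrying i and the accumulator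
def pvALoop (words : List String) : Nat → List String → List String → List String
  | _, [], acc => acc
  | i, w :: rest, acc =>
    pvALoop words (i + 1) rest
      (if pvACond1 w &&
          (decide (i = 0) ||
            (match PySem.List.pyGet? words ((i : Int) - 1) with
             | some p =>
               -- "words[i-1][-1] in '.!?'" (split() tokens are nonempty, so [-1] never raises)
               match PySem.Str.pyGet? p (-1) with
               | some c => PySem.Str.isIn (String.ofList [c]) ".!?"
               | none => false
             | none => false)) then
        acc ++ [PySem.Str.stripChars w ".,!?;:"]
      else acc)

def extract_characters_py (text : String) : List String :=
  let words := PySem.Str.split₀ text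
  let characters := pvALoop words 0 words []
  -- list(set(characters))[:10]; under Pre_ the set has at most one element, so first-occurrence order is exact
  PySem.List.slice (PySem.Set.ofList characters) none (some 10)

-- ===== PORT B =====
-- B-side helpers
-- "ch in '.!?'" for a single character
def pvIsEnd (ch : Char) : Bool := PySem.Str.isIn (String.ofList [ch]) ".!?"

-- body of B's segmentation loop: state = (segments, cur, after_ender)
def pvBStep (s : List String × List Char × Bool) (ch : Char) : List String × List Char × Bool :=
  let s := if s.2.2 && PySem.Chars.isspace ch then (s.1 ++ [String.ofList s.2.1], ([] : List Char), s.2.2) else s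
  (s.1, s.2.1 ++ [ch], pvIsEnd ch)

-- "w[0].isupper() and len(w) > 2"
def pvBQual (w : String) : Bool :=
  (match PySem.Str.pyGet? w 0 with | some c => PySem.Chars.isupper c | none => false) &&
    decide (PySem.Str.len w > 2)

def extract_characters_py_alt (text : String) : List String :=
  -- stage 1: sentence segments (cut before whitespace that follows . ! ?)
  let st := text.toList.foldl pvBStep ([], [], false)
  let segments := st.1 ++ [String.ofList st.2.1]
  -- stage 2: first whitespace-token of each segment
  let candidates := segments.flatMap (fun seg => (PySem.Str.split₀ seg).take 1)
  -- stage 3: filter, strip, ordered dedup, first 10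
  let characters := (candidates.filter pvBQual).map (fun w => PySem.Str.stripChars w ".,!?;:")
  PySem.List.slice (PySem.List.dedup characters) none (some 10)

-- ===== PRECONDITION & SPEC =====
-- "word[-1] in '.!?'" (token-level sentence-end test, used by the specification)
def pvBEnds (w : String) : Bool :=
  match PySem.Str.pyGet? w (-1) with
  | some c => PySem.Str.isIn (String.ofList [c]) ".!?"
  | none => false

-- the candidate names of a text: qualifying sentence-start tokens, stripped, in token order
def pvNames : Bool → List String → List String
  | _, [] => []
  | flag, w :: ws =>
    (if flag && pvBQual w then [PySem.Str.stripChars w ".,!?;:"] else []) ++ pvNames (pvBEnds w) ws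

-- Pre_ excludes texts with two or more DISTINCT candidate names: on those Python A's list(set(...))
-- order is CPython's randomized string-hash order, an accident no implementation should reproduce.
def Pre_extract_characters_py (text : String) : Prop :=
  (PySem.List.dedup (pvNames true (PySem.Str.split₀ text))).length ≤ 1
instance (text : String) : Decidable (Pre_extract_characters_py text) := by
  unfold Pre_extract_characters_py; infer_instance

def pvWitness_extract_characters_py : String := "Ali geldi."

def Spec_extract_characters_py (text : String) (out : List String) : Prop :=
  out = extract_characters_py_alt text
instance (text : String) (out : List String) : Decidable (Spec_extract_characters_py text out) := by
  unfold Spec_extract_characters_py; infer_instance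

-- ===== CLAIM (what is proved, stated in full; the proofs are below) =====
def Claim_equal_extract_characters_py : Prop := ∀ (text : String), Dom_extract_characters_py text → Pre_extract_characters_py text → Spec_extract_characters_py text (extract_characters_py text)

-- ===== LEMMAS AND PROOFS =====

-- the sentence-start tokens of a token list, as collected by A's lookback rule
def pvLeads : Bool → List String → List String
  | _, [] => []
  | flag, w :: ws => (if flag then [w] else []) ++ pvLeads (pvBEnds w) ws

theorem pvACond1_eq (w : String) : pvACond1 w = pvBQual w := by
  rcases hL : w.toList with _ | ⟨c, cs⟩
  · have hw : w = "" := String.toList_eq_nil_iff.mp hL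
    subst hw; rfl
  · have h0 : PySem.Str.pyGet? w 0 = some c := by
      simp [PySem.Str.pyGet?, PySem.Chars.pyGet?, hL]
    have hne : w ≠ "" := by intro e; rw [e] at hL; simp at hL
    unfold pvACond1 pvBQual
    rw [h0]
    simp [hne]

-- A's loop flag after the tokens pre have been consumed
def pvFlagOf (pre : List String) : Bool :=
  match pre.getLast? with
  | none => true
  | some p => pvBEnds p

theorem pvALoop_eq (words : List String) : ∀ (rest pre acc : List String),
    words = pre ++ rest →
    pvALoop words pre.length rest acc =
      acc ++ (((pvLeads (pvFlagOf pre) rest).filter pvBQual).map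
        (fun w => PySem.Str.stripChars w ".,!?;:")) := by
  intro rest
  induction rest with
  | nil => intro pre acc _; simp [pvALoop, pvLeads]
  | cons w rest ih =>
    intro pre acc hw
    have hflag :
        (decide (pre.length = 0) ||
          (match PySem.List.pyGet? words ((pre.length : Int) - 1) with
           | some p =>
             match PySem.Str.pyGet? p (-1) with
             | some c => PySem.Str.isIn (String.ofList [c]) ".!?"
             | none => false
           | none => false)) = pvFlagOf pre := by
      rcases List.eq_nil_or_concat pre with rfl | ⟨ps, p, rfl⟩
      · simp [pvFlagOf]
      · simp only [List.concat_eq_append] at hw ⊢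
        have hlen : ((ps ++ [p]).length : Int) - 1 = ((ps.length : Nat) : Int) := by
          simp only [List.length_append, List.length_cons, List.length_nil]; push_cast; omega
        have hget : PySem.List.pyGet? words ((ps.length : Nat) : Int) = some p := by
          rw [PySem.List.pyGet?_natCast]
          subst hw
          simp
        rw [hlen, hget]
        simp [pvFlagOf, pvBEnds]
    have hstep : pre.length + 1 = (pre ++ [w]).length := by simp
    have hw' : words = (pre ++ [w]) ++ rest := by simp [hw]
    have hfl' : pvFlagOf (pre ++ [w]) = pvBEnds w := by
      simp [pvFlagOf]
    calc pvALoop words pre.length (w :: rest) acc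
        = pvALoop words (pre ++ [w]).length rest
            (if pvACond1 w &&
                (decide (pre.length = 0) ||
                  (match PySem.List.pyGet? words ((pre.length : Int) - 1) with
                   | some p =>
                     match PySem.Str.pyGet? p (-1) with
                     | some c => PySem.Str.isIn (String.ofList [c]) ".!?"
                     | none => false
                   | none => false)) then
              acc ++ [PySem.Str.stripChars w ".,!?;:"]
            else acc) := by rw [pvALoop, hstep]
      _ = acc ++ (((pvLeads (pvFlagOf pre) (w :: rest)).filter pvBQual).map
            (fun w => PySem.Str.stripChars w ".,!?;:")) := by
          rw [ih (pre ++ [w]) _ hw', hflag, pvACond1_eq, hfl']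
          cases hf : pvFlagOf pre <;> cases hq : pvBQual w <;>
            simp [pvLeads, hq]

-- str.split() without the result accumulator (spec form of PySem.Chars.split₀.go)
def pvFin : List Char → List Char → List (List Char)
  | [], cur => if cur.isEmpty then [] else [cur.reverse]
  | c :: rest, cur =>
    if PySem.Chars.isspace c then
      (if cur.isEmpty then pvFin rest [] else cur.reverse :: pvFin rest [])
    else pvFin rest (c :: cur)

theorem pvGo_eq_fin : ∀ (cs : List Char) (cur : List Char) (acc : List (List Char)),
    PySem.Chars.split₀.go cs cur acc = acc.reverse ++ pvFin cs cur := by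
  intro cs
  induction cs with
  | nil => intro cur acc; by_cases h : cur.isEmpty <;> simp [PySem.Chars.split₀.go, pvFin, h]
  | cons c rest ih =>
    intro cur acc
    by_cases hs : PySem.Chars.isspace c <;> by_cases he : cur.isEmpty <;>
      simp [PySem.Chars.split₀.go, pvFin, hs, he, ih]

theorem pvSplit₀_eq_fin (cs : List Char) : PySem.Chars.split₀ cs = pvFin cs [] := by
  simp [PySem.Chars.split₀, pvGo_eq_fin]

theorem pvIsEnd_iff (c : Char) : pvIsEnd c = true ↔ (c = '.' ∨ c = '!' ∨ c = '?') := by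
  unfold pvIsEnd
  rw [PySem.Str.isIn_iff_infix]
  show (String.ofList [c]).toList <:+: (".!?" : String).toList ↔ _
  simp [List.singleton_infix_iff]

theorem pvIsEnd_space (c : Char) (h : PySem.Chars.isspace c = true) : pvIsEnd c = false := by
  cases he : pvIsEnd c
  · rfl
  · rcases (pvIsEnd_iff c).mp he with rfl | rfl | rfl <;> simp [PySem.Chars.isspace] at h

-- sentence segmentation, spec form: (rest of current segment, later segments), p = after_ender
def pvSegsF : Bool → List Char → List Char × List (List Char)
  | _, [] => ([], [])
  | p, c :: rest =>
    let pr := pvSegsF (pvIsEnd c) rest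
    if p && PySem.Chars.isspace c then ([], (c :: pr.1) :: pr.2)
    else (c :: pr.1, pr.2)

theorem pvFold_segs : ∀ (cs : List Char) (segs : List String) (cur : List Char) (p : Bool),
    (let st := cs.foldl pvBStep (segs, cur, p); st.1 ++ [String.ofList st.2.1]) =
      segs ++ String.ofList (cur ++ (pvSegsF p cs).1) ::
        ((pvSegsF p cs).2.map String.ofList) := by
  intro cs
  induction cs with
  | nil => intro segs cur p; simp [pvSegsF]
  | cons c rest ih =>
    intro segs cur p
    by_cases hb : p && PySem.Chars.isspace c <;>
      simp only [List.foldl_cons, pvBStep, pvSegsF, hb, if_true, if_false, Bool.false_eq_true] <;>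
      simp [ih, List.append_assoc]

-- char-level sentence-end test on a token
def pvCEnds (t : List Char) : Bool :=
  match t.getLast? with
  | some c => pvIsEnd c
  | none => false

-- char-level leads
def pvCLeads : Bool → List (List Char) → List (List Char)
  | _, [] => []
  | flag, t :: ts => (if flag then [t] else []) ++ pvCLeads (pvCEnds t) ts

def pvCHeads (segs : List (List Char)) : List (List Char) :=
  segs.flatMap (fun seg => (pvFin seg []).take 1)

-- the main segmentation lemma: heads of the sentence segments = the lookback leads
theorem pvCHeads_cons (t : List Char) (ts : List (List Char)) :
    pvCHeads (t :: ts) = (pvFin t []).take 1 ++ pvCHeads ts := by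
  simp [pvCHeads]

theorem pvMain : ∀ (cs cur : List Char) (p b : Bool),
    (p = true → cur ≠ []) → (cur ≠ [] → pvCEnds cur.reverse = p) →
    (if b then (pvFin (pvSegsF p cs).1 cur).take 1 else []) ++ pvCHeads (pvSegsF p cs).2 =
      pvCLeads b (pvFin cs cur) := by
  intro cs
  induction cs with
  | nil =>
    intro cur p b _ _
    by_cases he : cur = [] <;> cases b <;>
      simp [pvSegsF, pvFin, pvCHeads, pvCLeads, he]
  | cons c rest ih =>
    intro cur p b h1 h2
    by_cases hs : PySem.Chars.isspace c = true
    · have hpe : pvIsEnd c = false := pvIsEnd_space c hs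
      by_cases hp : p = true
      · subst hp
        have hcur : cur ≠ [] := h1 rfl
        have hend : pvCEnds cur.reverse = true := h2 hcur
        have ihx := ih [] false true (by simp) (by simp)
        simp only [if_true] at ihx
        have hA : pvSegsF true (c :: rest) =
            ([], (c :: (pvSegsF false rest).1) :: (pvSegsF false rest).2) := by
          simp [pvSegsF, hs, hpe]
        have hB : pvFin (c :: rest) cur = cur.reverse :: pvFin rest [] := by
          simp [pvFin, hs, hcur]
        have hC : pvFin (c :: (pvSegsF false rest).1) [] = pvFin (pvSegsF false rest).1 [] := by
          simp [pvFin, hs]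
        have hD : pvFin ([] : List Char) cur = [cur.reverse] := by simp [pvFin, hcur]
        rw [hA, hB]
        simp only [pvCHeads_cons, hC, hD]
        cases b <;> simp [pvCLeads, hend, ihx]
      · have hp' : p = false := by simpa using hp
        subst hp'
        have hA : pvSegsF false (c :: rest) =
            ((c :: (pvSegsF false rest).1), (pvSegsF false rest).2) := by
          simp [pvSegsF, hs, hpe]
        by_cases he : cur = []
        · subst he
          have ihx := ih [] false b (by simp) (by simp)
          have hB : pvFin (c :: rest) ([] : List Char) = pvFin rest [] := by
            simp [pvFin, hs]
          have hC : pvFin (c :: (pvSegsF false rest).1) ([] : List Char) =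
              pvFin (pvSegsF false rest).1 [] := by
            simp [pvFin, hs]
          rw [hA, hB]
          simpa [hC] using ihx
        · have hend : pvCEnds cur.reverse = false := h2 he
          have ihx := ih [] false false (by simp) (by simp)
          simp only [if_false, List.nil_append, Bool.false_eq_true] at ihx
          have hB : pvFin (c :: rest) cur = cur.reverse :: pvFin rest [] := by
            simp [pvFin, hs, he]
          have hC : pvFin (c :: (pvSegsF false rest).1) cur =
              cur.reverse :: pvFin (pvSegsF false rest).1 [] := by
            simp [pvFin, hs, he]
          rw [hA, hB]
          simp only [hC]
          cases b <;> simp [pvCLeads, hend, ihx]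
    · have hsB : PySem.Chars.isspace c = false := by simpa using hs
      have hlast : pvCEnds (c :: cur).reverse = pvIsEnd c := by
        simp [pvCEnds]
      have ihx := ih (c :: cur) (pvIsEnd c) b (by simp) (fun _ => hlast)
      have hA : pvSegsF p (c :: rest) =
          ((c :: (pvSegsF (pvIsEnd c) rest).1), (pvSegsF (pvIsEnd c) rest).2) := by
        simp [pvSegsF, hsB]
      have hB : pvFin (c :: rest) cur = pvFin rest (c :: cur) := by
        simp [pvFin, hsB]
      have hC : pvFin (c :: (pvSegsF (pvIsEnd c) rest).1) cur =
          pvFin (pvSegsF (pvIsEnd c) rest).1 (c :: cur) := by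
        simp [pvFin, hsB]
      rw [hA, hB]
      simpa [hC] using ihx

theorem pvBEnds_ofList (t : List Char) : pvBEnds (String.ofList t) = pvCEnds t := by
  unfold pvBEnds pvCEnds pvIsEnd
  simp [PySem.List.pyGet?_neg_one]

theorem pvLeads_map_ofList (ts : List (List Char)) : ∀ (flag : Bool),
    pvLeads flag (ts.map String.ofList) = (pvCLeads flag ts).map String.ofList := by
  induction ts with
  | nil => intro flag; simp [pvLeads, pvCLeads]
  | cons t ts ih =>
    intro flag
    cases flag <;> simp [pvLeads, pvCLeads, pvBEnds_ofList, ih]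

-- B's candidate list is exactly the lookback leads of the token list
theorem pvB_candidates (text : String) :
    ((let st := text.toList.foldl pvBStep ([], [], false); st.1 ++ [String.ofList st.2.1]).flatMap
        (fun seg => (PySem.Str.split₀ seg).take 1)) =
      pvLeads true (PySem.Str.split₀ text) := by
  rw [pvFold_segs]
  have hseg : ∀ (seg : List Char),
      (PySem.Str.split₀ (String.ofList seg)).take 1 = ((pvFin seg []).take 1).map String.ofList := by
    intro seg
    show ((PySem.Chars.split₀ (String.ofList seg).toList).map String.ofList).take 1 = _
    simp [pvSplit₀_eq_fin, List.map_take]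
  have hmain := pvMain text.toList [] false true (by simp) (by simp)
  simp only [if_true] at hmain
  calc ([] ++ String.ofList ([] ++ (pvSegsF false text.toList).1) ::
          ((pvSegsF false text.toList).2.map String.ofList)).flatMap
            (fun seg => (PySem.Str.split₀ seg).take 1)
      = ((pvSegsF false text.toList).1 :: (pvSegsF false text.toList).2).flatMap
          (fun seg => ((pvFin seg []).take 1).map String.ofList) := by
        simp [hseg, List.flatMap_cons, List.flatMap_map]
    _ = (((pvSegsF false text.toList).1 :: (pvSegsF false text.toList).2).flatMap
          (fun seg => (pvFin seg []).take 1)).map String.ofList := by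
        rw [List.map_flatMap]
    _ = (pvCLeads true (pvFin text.toList [])).map String.ofList := by
        rw [← hmain]; simp [pvCHeads, List.flatMap_cons]
    _ = pvLeads true (PySem.Str.split₀ text) := by
        rw [← pvLeads_map_ofList]
        show _ = pvLeads true ((PySem.Chars.split₀ text.toList).map String.ofList)
        rw [pvSplit₀_eq_fin]

-- ===== VERDICT (by name: the statement is the Claim_ definition above) =====
theorem extract_characters_py_spec : Claim_equal_extract_characters_py := by
  unfold Claim_equal_extract_characters_py
  intro text _ _
  unfold Spec_extract_characters_py
  have hA := pvALoop_eq (PySem.Str.split₀ text) (PySem.Str.split₀ text) [] [] (by simp)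
  have hfl : pvFlagOf ([] : List String) = true := rfl
  simp only [List.length_nil, List.nil_append, hfl] at hA
  show PySem.List.slice (PySem.Set.ofList
        (pvALoop (PySem.Str.split₀ text) 0 (PySem.Str.split₀ text) [])) none (some 10) = _
  rw [hA]
  show _ = PySem.List.slice (PySem.List.dedup
        ((((let st := text.toList.foldl pvBStep ([], [], false);
            st.1 ++ [String.ofList st.2.1]).flatMap
              (fun seg => (PySem.Str.split₀ seg).take 1)).filter pvBQual).map
          (fun w => PySem.Str.stripChars w ".,!?;:"))) none (some 10)
  rw [pvB_candidates, PySem.List.dedup_eq_ofList]
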